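-- pv_equiv track=rewrite | github.com/omidahmadii/PersiaPro_bot | handlers/admin/plan_managment.py | plan_field_help_lines
-- ===== SOURCE A (Python) =====
-- PLAN_CATEGORY_LABELS = {
--     "standard": "عادی",
--     "fixed_ip": "آی‌پی ثابت",
--     "dual": "دوکاربره",
--     "custom_location": "لوکیشن انتخابی",
--     "modem": "مودم/روتر",
--     "special_access": "دسترسی ویژه",
-- }
--
-- ACCESS_LEVEL_LABELS = {
--     "all": "همه کاربران",
--     "user": "فقط کاربران عادی",
--     "agent": "فقط نماینده‌ها",
--     "admin": "فقط ادمین‌ها",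
-- }
--
-- DISPLAY_CONTEXT_LABELS = {
--     "all": "همه‌جا",
--     "purchase": "فقط خرید",
--     "renew": "فقط تمدید",
--     "agent": "فقط نماینده‌ها",
-- }
--
-- PLAN_INTEGER_FIELDS = {
--     "volume_gb",
--     "duration_months",
--     "duration_days",
--     "max_users",
--     "price",
--     "order_priority",
-- }
--
-- PLAN_BOOLEAN_FIELDS = {"visible", "is_unlimited"}
--
-- PLAN_NULLABLE_TEXT_FIELDS = {"location", "group_name"}
--
-- def plan_field_help_lines(field: str) -> list[str]:
--     if field in PLAN_BOOLEAN_FIELDS: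
--         return ["مقدار مجاز: 1 یا 0، بله یا خیر، فعال یا غیرفعال"]
--     if field == "category":
--         return [
--             "مقدارهای مجاز:",
--             ", ".join(f"{key} ({label})" for key, label in PLAN_CATEGORY_LABELS.items()),
--         ]
--     if field == "access_level":
--         return [
--             "مقدارهای مجاز:",
--             ", ".join(f"{key} ({label})" for key, label in ACCESS_LEVEL_LABELS.items()),
--         ]
--     if field == "display_context":
--         return [
--             "مقدارهای مجاز:",
--             ", ".join(f"{key} ({label})" for key, label in DISPLAY_CONTEXT_LABELS.items()),
--         ]
--     if field in PLAN_NULLABLE_TEXT_FIELDS: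
--         return ["برای خالی‌کردن مقدار، «پاک» یا «-» را ارسال کن."]
--     if field in PLAN_INTEGER_FIELDS:
--         return ["فقط عدد صحیح غیرمنفی قابل قبول است."]
--     return []
-- ===== SOURCE B (Python) =====
-- PLAN_CATEGORY_LABELS = {
--     "standard": "عادی",
--     "fixed_ip": "آی‌پی ثابت",
--     "dual": "دوکاربره",
--     "custom_location": "لوکیشن انتخابی",
--     "modem": "مودم/روتر",
--     "special_access": "دسترسی ویژه",
-- }
--
-- ACCESS_LEVEL_LABELS = {
--     "all": "همه کاربران",
--     "user": "فقط کاربران عادی",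
--     "agent": "فقط نماینده‌ها",
--     "admin": "فقط ادمین‌ها",
-- }
--
-- DISPLAY_CONTEXT_LABELS = {
--     "all": "همه‌جا",
--     "purchase": "فقط خرید",
--     "renew": "فقط تمدید",
--     "agent": "فقط نماینده‌ها",
-- }
--
--
-- def _choices(labels):
--     return ["مقدارهای مجاز:", ", ".join(f"{key} ({label})" for key, label in labels.items())]
--
--
-- # Declarative rule list: (field names, help lines). The field sets are pairwise
-- # disjoint, so collecting the lines of every matching rule yields exactly the
-- # lines of the unique matching rule, or [] when none matches.
-- _RULES = [
--     (("visible", "is_unlimited"),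
--      ["مقدار مجاز: 1 یا 0، بله یا خیر، فعال یا غیرفعال"]),
--     (("category",), _choices(PLAN_CATEGORY_LABELS)),
--     (("access_level",), _choices(ACCESS_LEVEL_LABELS)),
--     (("display_context",), _choices(DISPLAY_CONTEXT_LABELS)),
--     (("location", "group_name"),
--      ["برای خالی‌کردن مقدار، «پاک» یا «-» را ارسال کن."]),
--     (("volume_gb", "duration_months", "duration_days", "max_users", "price", "order_priority"),
--      ["فقط عدد صحیح غیرمنفی قابل قبول است."]),
-- ]
--
--
-- def plan_field_help_lines(field: str) -> list[str]:
--     return [line for names, lines in _RULES if field in names for line in lines]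
-- ===== Notes on version B (the rewrite author's own statement) =====
-- stated objective: alternative
-- what changed: Replaces A's six-branch if/elif chain over three sets and three special-cased keys by a declarative rule list of (field-names, lines) pairs scanned once, concatenating the lines of every matching rule (the field sets are disjoint, so this is the unique match or []).
import Mathlib
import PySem

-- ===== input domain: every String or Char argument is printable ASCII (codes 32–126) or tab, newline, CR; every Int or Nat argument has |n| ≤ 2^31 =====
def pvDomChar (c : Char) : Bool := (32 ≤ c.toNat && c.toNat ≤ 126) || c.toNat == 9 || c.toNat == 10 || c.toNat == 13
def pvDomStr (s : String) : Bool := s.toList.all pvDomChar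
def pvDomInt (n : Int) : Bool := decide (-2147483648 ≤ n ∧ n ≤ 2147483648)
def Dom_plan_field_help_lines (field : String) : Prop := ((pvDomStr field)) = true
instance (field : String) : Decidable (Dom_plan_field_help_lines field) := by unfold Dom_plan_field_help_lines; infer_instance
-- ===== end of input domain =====

set_option maxRecDepth 4000


-- B replaces A's if/elif branch chain by a scan over a declarative rule list of
-- (field-names, lines) pairs, concatenating the lines of all matching rules; objective: alternative.

-- ===== PORT A =====
def PLAN_CATEGORY_LABELS : PySem.Dict String String := PySem.Dict.ofList
  [("standard", "عادی"), ("fixed_ip", "آی‌پی ثابت"), ("dual", "دوکاربره"),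
   ("custom_location", "لوکیشن انتخابی"), ("modem", "مودم/روتر"), ("special_access", "دسترسی ویژه")]

def ACCESS_LEVEL_LABELS : PySem.Dict String String := PySem.Dict.ofList
  [("all", "همه کاربران"), ("user", "فقط کاربران عادی"), ("agent", "فقط نماینده‌ها"), ("admin", "فقط ادمین‌ها")]

def DISPLAY_CONTEXT_LABELS : PySem.Dict String String := PySem.Dict.ofList
  [("all", "همه‌جا"), ("purchase", "فقط خرید"), ("renew", "فقط تمدید"), ("agent", "فقط نماینده‌ها")]

def PLAN_INTEGER_FIELDS : PySem.Set String := PySem.Set.ofList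
  ["volume_gb", "duration_months", "duration_days", "max_users", "price", "order_priority"]

def PLAN_BOOLEAN_FIELDS : PySem.Set String := PySem.Set.ofList ["visible", "is_unlimited"]

def PLAN_NULLABLE_TEXT_FIELDS : PySem.Set String := PySem.Set.ofList ["location", "group_name"]

def plan_field_help_lines (field : String) : List String :=
  if field ∈ PLAN_BOOLEAN_FIELDS then
    ["مقدار مجاز: 1 یا 0، بله یا خیر، فعال یا غیرفعال"]
  else if field == "category" then
    ["مقدارهای مجاز:",
     PySem.Str.join ", " (PLAN_CATEGORY_LABELS.items.map (fun p => p.1 ++ " (" ++ p.2 ++ ")"))]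
  else if field == "access_level" then
    ["مقدارهای مجاز:",
     PySem.Str.join ", " (ACCESS_LEVEL_LABELS.items.map (fun p => p.1 ++ " (" ++ p.2 ++ ")"))]
  else if field == "display_context" then
    ["مقدارهای مجاز:",
     PySem.Str.join ", " (DISPLAY_CONTEXT_LABELS.items.map (fun p => p.1 ++ " (" ++ p.2 ++ ")"))]
  else if field ∈ PLAN_NULLABLE_TEXT_FIELDS then
    ["برای خالی‌کردن مقدار، «پاک» یا «-» را ارسال کن."]
  else if field ∈ PLAN_INTEGER_FIELDS then
    ["فقط عدد صحیح غیرمنفی قابل قبول است."]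
  else []

-- ===== PORT B =====
def planCategoryLabelsB : PySem.Dict String String := PySem.Dict.ofList
  [("standard", "عادی"), ("fixed_ip", "آی‌پی ثابت"), ("dual", "دوکاربره"),
   ("custom_location", "لوکیشن انتخابی"), ("modem", "مودم/روتر"), ("special_access", "دسترسی ویژه")]

def accessLevelLabelsB : PySem.Dict String String := PySem.Dict.ofList
  [("all", "همه کاربران"), ("user", "فقط کاربران عادی"), ("agent", "فقط نماینده‌ها"), ("admin", "فقط ادمین‌ها")]

def displayContextLabelsB : PySem.Dict String String := PySem.Dict.ofList
  [("all", "همه‌جا"), ("purchase", "فقط خرید"), ("renew", "فقط تمدید"), ("agent", "فقط نماینده‌ها")]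

def choicesB (labels : PySem.Dict String String) : List String :=
  ["مقدارهای مجاز:",
   PySem.Str.join ", " (labels.items.map (fun p => p.1 ++ " (" ++ p.2 ++ ")"))]

-- declarative rule list: (field names, help lines), disjoint name lists
def rulesB : List (List String × List String) :=
  [(["visible", "is_unlimited"],
    ["مقدار مجاز: 1 یا 0، بله یا خیر، فعال یا غیرفعال"]),
   (["category"], choicesB planCategoryLabelsB),
   (["access_level"], choicesB accessLevelLabelsB),
   (["display_context"], choicesB displayContextLabelsB),
   (["location", "group_name"],
    ["برای خالی‌کردن مقدار، «پاک» یا «-» را ارسال کن."]),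
   (["volume_gb", "duration_months", "duration_days", "max_users", "price", "order_priority"],
    ["فقط عدد صحیح غیرمنفی قابل قبول است."])]

-- the comprehension: collect the lines of every rule whose name list contains field
def plan_field_help_lines_alt (field : String) : List String :=
  rulesB.flatMap (fun r => if field ∈ r.1 then r.2 else [])

-- ===== PRECONDITION & SPEC =====
def Spec_plan_field_help_lines (field : String) (out : List String) : Prop := out = plan_field_help_lines_alt field
instance (field : String) (out : List String) : Decidable (Spec_plan_field_help_lines field out) := by unfold Spec_plan_field_help_lines; infer_instance

-- ===== CLAIM (what is proved, stated in full; the proofs are below) =====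
def Claim_equal_plan_field_help_lines : Prop := ∀ (field : String), Dom_plan_field_help_lines field → Spec_plan_field_help_lines field (plan_field_help_lines field)

-- ===== LEMMAS AND PROOFS =====

-- ===== VERDICT (by name: the statement is the Claim_ definition above) =====
theorem plan_field_help_lines_spec : Claim_equal_plan_field_help_lines := by
  intro field _
  unfold Spec_plan_field_help_lines plan_field_help_lines plan_field_help_lines_alt
  by_cases h1 : field = "visible"; · subst h1; decide
  by_cases h2 : field = "is_unlimited"; · subst h2; decide
  by_cases h3 : field = "category"; · subst h3; decide
  by_cases h4 : field = "access_level"; · subst h4; decide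
  by_cases h5 : field = "display_context"; · subst h5; decide
  by_cases h6 : field = "location"; · subst h6; decide
  by_cases h7 : field = "group_name"; · subst h7; decide
  by_cases h8 : field = "volume_gb"; · subst h8; decide
  by_cases h9 : field = "duration_months"; · subst h9; decide
  by_cases h10 : field = "duration_days"; · subst h10; decide
  by_cases h11 : field = "max_users"; · subst h11; decide
  by_cases h12 : field = "price"; · subst h12; decide
  by_cases h13 : field = "order_priority"; · subst h13; decide
  simp [PLAN_BOOLEAN_FIELDS, PLAN_NULLABLE_TEXT_FIELDS, PLAN_INTEGER_FIELDS,
        rulesB, PySem.Set.mem_ofList, List.flatMap,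
        h1, h2, h3, h4, h5, h6, h7, h8, h9, h10, h11, h12, h13]
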